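-- pv_equiv track=rewrite | github.com/pypi-data/pypi-mirror-284 | packages/tcod-camera/tcod_camera-1.0.1-py3-none-any.whl/tcod/camera/__init__.py | _get_chunked_slices_1d
-- ===== SOURCE A (Python) =====
-- from typing import TYPE_CHECKING, Any, Iterator, TypeVar, overload
--
-- def _get_chunked_slices_1d(screen_width: int, chunk_size: int, camera_pos: int) -> Iterator[tuple[slice, int, slice]]:
--     """Iterate chucked slices along an axis.
--
--     >>> list(_get_chunked_slices_1d(20, 10, 0))
--     [(slice(0, 10, None), 0, slice(0, 10, None)), (slice(10, 20, None), 1, slice(0, 10, None))]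
--     >>> list(_get_chunked_slices_1d(20, 10, -5))
--     [(slice(0, 5, None), -1, slice(5, 10, None)), (slice(5, 15, None), 0, slice(0, 10, None)), (slice(15, 20, None), 1, slice(0, 5, None))]
--     """
--     assert chunk_size > 0
--     screen_left = 0
--     segment_id, chunk_left = divmod(camera_pos, chunk_size)
--     while screen_left < screen_width:
--         # Get width until the end of the chunk or the end of the screen.
--         chunk_width = min(chunk_size - chunk_left, screen_width - screen_left)
--         yield slice(screen_left, screen_left + chunk_width), segment_id, slice(chunk_left, chunk_left + chunk_width)
--         chunk_left = 0  # All chunks after the first start at zero.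
--         screen_left += chunk_width
--         segment_id += 1
-- ===== SOURCE B (Python) =====
-- def _get_chunked_slices_1d(screen_width: int, chunk_size: int, camera_pos: int):
--     """Yield chunked slice tuples along one axis by direct segment-index arithmetic."""
--     assert chunk_size > 0
--     if screen_width <= 0:
--         return
--     start_seg = camera_pos // chunk_size
--     end_seg = (camera_pos + screen_width - 1) // chunk_size
--     for seg in range(start_seg, end_seg + 1):
--         screen_start = max(0, seg * chunk_size - camera_pos)
--         screen_end = min(screen_width, (seg + 1) * chunk_size - camera_pos)
--         yield (
--             slice(screen_start, screen_end),
--             seg,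
--             slice(screen_start + camera_pos - seg * chunk_size,
--                   screen_end + camera_pos - seg * chunk_size),
--         )
-- ===== Notes on version B (the rewrite author's own statement) =====
-- stated objective: alternative
-- what changed: Replaces the while loop threading screen_left/segment_id/chunk_left accumulators by a direct for-loop over the segment-id range computed with floor division, deriving each slice pair by closed-form arithmetic per segment.
import Mathlib
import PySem

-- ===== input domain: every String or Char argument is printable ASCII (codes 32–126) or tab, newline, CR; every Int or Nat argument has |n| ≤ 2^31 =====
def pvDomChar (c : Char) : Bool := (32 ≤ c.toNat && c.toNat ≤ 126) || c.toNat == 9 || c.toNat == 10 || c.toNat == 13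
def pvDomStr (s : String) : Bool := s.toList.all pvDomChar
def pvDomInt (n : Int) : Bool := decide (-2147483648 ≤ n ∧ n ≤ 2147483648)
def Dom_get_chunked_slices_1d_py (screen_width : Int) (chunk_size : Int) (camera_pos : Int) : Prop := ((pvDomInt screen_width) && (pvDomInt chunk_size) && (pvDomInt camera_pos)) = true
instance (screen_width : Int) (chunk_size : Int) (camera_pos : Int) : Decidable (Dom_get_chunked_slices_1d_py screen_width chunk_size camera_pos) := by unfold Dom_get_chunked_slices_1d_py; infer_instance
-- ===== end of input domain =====

-- B replaces A's accumulator-threading while loop by a for-loop over the directly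
-- computed segment-id range with per-segment closed-form slice arithmetic (objective: alternative).

-- ===== PORT A =====
-- slice(a, b) literal
def pvSliceAB (a b : Int) : Option Int × Option Int × Option Int := (some a, some b, none)

-- the while loop of A, with fuel making the recursion total (enough fuel is supplied below;
-- each iteration advances screen_left by at least 1 on inputs satisfying Pre_)
def get_chunked_slices_1d_loopA (screen_width chunk_size : Int) :
    Nat → Int → Int → Int → List ((Option Int × Option Int × Option Int) × Int × (Option Int × Option Int × Option Int))
  | 0, _, _, _ => []
  | fuel + 1, screen_left, segment_id, chunk_left =>
    if screen_left < screen_width then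
      let chunk_width := min (chunk_size - chunk_left) (screen_width - screen_left)
      (pvSliceAB screen_left (screen_left + chunk_width), segment_id,
        pvSliceAB chunk_left (chunk_left + chunk_width)) ::
        get_chunked_slices_1d_loopA screen_width chunk_size fuel
          (screen_left + chunk_width) (segment_id + 1) 0
    else []

def get_chunked_slices_1d_py (screen_width : Int) (chunk_size : Int) (camera_pos : Int) : List ((Option Int × Option Int × Option Int) × Int × (Option Int × Option Int × Option Int)) :=
  get_chunked_slices_1d_loopA screen_width chunk_size screen_width.toNat 0
    (PySem.Int.floordiv camera_pos chunk_size) (PySem.Int.mod camera_pos chunk_size)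

-- ===== PORT B =====
def get_chunked_slices_1d_py_alt (screen_width : Int) (chunk_size : Int) (camera_pos : Int) : List ((Option Int × Option Int × Option Int) × Int × (Option Int × Option Int × Option Int)) :=
  if screen_width ≤ 0 then []
  else
    let start_seg := PySem.Int.floordiv camera_pos chunk_size
    let end_seg := PySem.Int.floordiv (camera_pos + screen_width - 1) chunk_size
    (PySem.List.pyRange start_seg (end_seg + 1) 1).map (fun seg =>
      let screen_start := max 0 (seg * chunk_size - camera_pos)
      let screen_end := min screen_width ((seg + 1) * chunk_size - camera_pos)
      (pvSliceAB screen_start screen_end, seg,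
        pvSliceAB (screen_start + camera_pos - seg * chunk_size)
                  (screen_end + camera_pos - seg * chunk_size)))

-- ===== PRECONDITION & SPEC =====
-- Python A asserts chunk_size > 0 (AssertionError otherwise); those inputs are excluded.
def Pre_get_chunked_slices_1d_py (screen_width : Int) (chunk_size : Int) (camera_pos : Int) : Prop := 0 < chunk_size
instance (screen_width : Int) (chunk_size : Int) (camera_pos : Int) : Decidable (Pre_get_chunked_slices_1d_py screen_width chunk_size camera_pos) := by unfold Pre_get_chunked_slices_1d_py; infer_instance
def pvWitness_get_chunked_slices_1d_py : Int × Int × Int := (20, 10, -5)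

def Spec_get_chunked_slices_1d_py (screen_width : Int) (chunk_size : Int) (camera_pos : Int) (out : List ((Option Int × Option Int × Option Int) × Int × (Option Int × Option Int × Option Int))) : Prop := out = get_chunked_slices_1d_py_alt screen_width chunk_size camera_pos
instance (screen_width : Int) (chunk_size : Int) (camera_pos : Int) (out : List ((Option Int × Option Int × Option Int) × Int × (Option Int × Option Int × Option Int))) : Decidable (Spec_get_chunked_slices_1d_py screen_width chunk_size camera_pos out) := by unfold Spec_get_chunked_slices_1d_py; infer_instance

-- ===== CLAIM (what is proved, stated in full; the proofs are below) =====
def Claim_equal_get_chunked_slices_1d_py : Prop := ∀ (screen_width : Int) (chunk_size : Int) (camera_pos : Int), Dom_get_chunked_slices_1d_py screen_width chunk_size camera_pos → Pre_get_chunked_slices_1d_py screen_width chunk_size camera_pos → Spec_get_chunked_slices_1d_py screen_width chunk_size camera_pos (get_chunked_slices_1d_py screen_width chunk_size camera_pos)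

-- ===== LEMMAS AND PROOFS =====

-- loop invariant: entering an iteration with segment id `seg` (for seg ≥ camera_pos // cs),
-- screen_left = max 0 (seg*cs - cp) and chunk_left = max 0 (cp - seg*cs); the remaining
-- output is exactly B's map over segments seg .. end_seg.
theorem get_chunked_slices_1d_loop_eq
    (sw cs cp : Int) (hcs : 0 < cs) (hsw : 0 < sw) :
    ∀ (fuel : Nat) (seg : Int), PySem.Int.floordiv cp cs ≤ seg →
      (sw - max 0 (seg * cs - cp)).toNat ≤ fuel →
      get_chunked_slices_1d_loopA sw cs fuel (max 0 (seg * cs - cp)) seg (max 0 (cp - seg * cs)) =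
        (PySem.List.pyRange seg (PySem.Int.floordiv (cp + sw - 1) cs + 1) 1).map (fun s =>
          (pvSliceAB (max 0 (s * cs - cp)) (min sw ((s + 1) * cs - cp)), s,
            pvSliceAB (max 0 (s * cs - cp) + cp - s * cs)
                      (min sw ((s + 1) * cs - cp) + cp - s * cs))) := by
  intro fuel
  induction fuel with
  | zero =>
      intro seg hseg hfuel
      have hsl : sw ≤ seg * cs - cp := by omega
      have hend : PySem.Int.floordiv (cp + sw - 1) cs < seg := by
        rw [PySem.Int.floordiv_lt_iff_lt_mul hcs]; omega
      rw [PySem.List.pyRange_one_eq_nil (by omega), List.map_nil]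
      rfl
  | succ fuel ih =>
      intro seg hseg hfuel
      -- linear bridges for omega (seg*cs, (seg+1)*cs, floordiv cp cs * cs are distinct atoms)
      have hm1 : (seg + 1) * cs = seg * cs + cs := by ring
      have hfloor := PySem.Int.floordiv_mul_add_mod cp cs
      have hmodlt := PySem.Int.mod_lt cp hcs
      have hmodnn := PySem.Int.mod_nonneg cp hcs
      have hfle : PySem.Int.floordiv cp cs * cs ≤ seg * cs :=
        mul_le_mul_of_nonneg_right hseg hcs.le
      have hA : cp - seg * cs < cs := by omega
      by_cases hlt : max 0 (seg * cs - cp) < sw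
      · -- looping case: one chunk is emitted
        have hsegle : seg ≤ PySem.Int.floordiv (cp + sw - 1) cs := by
          rw [PySem.Int.le_floordiv_iff_mul_le hcs]; omega
        rw [PySem.List.pyRange_one_cons (by omega), List.map_cons,
            get_chunked_slices_1d_loopA, if_pos hlt]
        refine congrArg₂ List.cons ?_ ?_
        · simp only [pvSliceAB, Prod.mk.injEq, Option.some.injEq]
          and_intros <;> first | trivial | omega
        · -- tail: the next loop state is the canonical state for seg + 1
          by_cases hcont : (seg + 1) * cs - cp ≤ sw
          · have hst : max 0 (seg * cs - cp) +
                min (cs - max 0 (cp - seg * cs)) (sw - max 0 (seg * cs - cp)) =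
                max 0 ((seg + 1) * cs - cp) := by omega
            have := ih (seg + 1) (by omega) (by omega)
            have hz : max 0 (cp - (seg + 1) * cs) = 0 := by omega
            rw [hz, ← hst] at this
            exact this
          · -- the screen ends inside this chunk: both remainders are empty
            have hend : PySem.Int.floordiv (cp + sw - 1) cs < seg + 1 := by
              rw [PySem.Int.floordiv_lt_iff_lt_mul hcs]; omega
            rw [PySem.List.pyRange_one_eq_nil (by omega), List.map_nil]
            have hst : max 0 (seg * cs - cp) +
                min (cs - max 0 (cp - seg * cs)) (sw - max 0 (seg * cs - cp)) = sw := by omega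
            rw [hst]
            cases fuel with
            | zero => rfl
            | succ f => rw [get_chunked_slices_1d_loopA, if_neg (by omega)]
      · -- the screen is already exhausted
        have hsl : sw ≤ seg * cs - cp := by omega
        have hend : PySem.Int.floordiv (cp + sw - 1) cs < seg := by
          rw [PySem.Int.floordiv_lt_iff_lt_mul hcs]; omega
        rw [get_chunked_slices_1d_loopA, if_neg hlt,
            PySem.List.pyRange_one_eq_nil (by omega), List.map_nil]

-- ===== VERDICT (by name: the statement is the Claim_ definition above) =====
theorem get_chunked_slices_1d_py_spec : Claim_equal_get_chunked_slices_1d_py := by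
  intro sw cs cp _ hpre
  unfold Spec_get_chunked_slices_1d_py get_chunked_slices_1d_py get_chunked_slices_1d_py_alt
  have hcs : 0 < cs := hpre
  by_cases hsw : sw ≤ 0
  · rw [if_pos hsw]
    have : sw.toNat = 0 := by omega
    rw [this]; rfl
  · rw [if_neg hsw]
    have hfloor := PySem.Int.floordiv_mul_add_mod cp cs
    have hmodlt := PySem.Int.mod_lt cp hcs
    have hmodnn := PySem.Int.mod_nonneg cp hcs
    have h0 : (0 : Int) = max 0 (PySem.Int.floordiv cp cs * cs - cp) := by omega
    have hm : PySem.Int.mod cp cs = max 0 (cp - PySem.Int.floordiv cp cs * cs) := by omega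
    calc get_chunked_slices_1d_loopA sw cs sw.toNat 0 (PySem.Int.floordiv cp cs) (PySem.Int.mod cp cs)
        = get_chunked_slices_1d_loopA sw cs sw.toNat
            (max 0 (PySem.Int.floordiv cp cs * cs - cp)) (PySem.Int.floordiv cp cs)
            (max 0 (cp - PySem.Int.floordiv cp cs * cs)) := by rw [← h0, ← hm]
      _ = _ := by
          rw [get_chunked_slices_1d_loop_eq sw cs cp hcs (by omega) sw.toNat
            (PySem.Int.floordiv cp cs) le_rfl (by omega)]
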